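-- pv_equiv track=rewrite | github.com/flashlin/Samples | torch-self-drive-car/radar.py | generate_angles
-- ===== SOURCE A (Python) =====
-- def generate_angles(count: int, angle: int) -> list[int]:
--     angles = []
--     start_angle = 0
--     counter = 0
--     if count % 2 != 0:
--         angles.append(start_angle)
--         counter = 1
--
--     for i in range(1, count):
--         if i % 2 == 1:
--             angles.append(start_angle - counter * angle)
--         else:
--             angles.append(start_angle + counter * angle)
--             counter += 1
--
--     return angles
-- ===== SOURCE B (Python) =====
-- def generate_angles(count: int, angle: int) -> list[int]:
--     p = 1 if count % 2 != 0 else 0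
--     length = p + max(count - 1, 0)
--     return [((j + p) // 2) * angle * (-1 if j % 2 == p else 1) for j in range(length)]
-- ===== Notes on version B (the rewrite author's own statement) =====
-- stated objective: alternative
-- what changed: B replaces A's stateful loop (running counter threaded through an index-parity branch) with a closed-form per-index formula: the list is a single comprehension over range(length) where element j is ((j+p)//2)*angle with a parity-determined sign, p being count's parity; no accumulator or counter exists.
import Mathlib
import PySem

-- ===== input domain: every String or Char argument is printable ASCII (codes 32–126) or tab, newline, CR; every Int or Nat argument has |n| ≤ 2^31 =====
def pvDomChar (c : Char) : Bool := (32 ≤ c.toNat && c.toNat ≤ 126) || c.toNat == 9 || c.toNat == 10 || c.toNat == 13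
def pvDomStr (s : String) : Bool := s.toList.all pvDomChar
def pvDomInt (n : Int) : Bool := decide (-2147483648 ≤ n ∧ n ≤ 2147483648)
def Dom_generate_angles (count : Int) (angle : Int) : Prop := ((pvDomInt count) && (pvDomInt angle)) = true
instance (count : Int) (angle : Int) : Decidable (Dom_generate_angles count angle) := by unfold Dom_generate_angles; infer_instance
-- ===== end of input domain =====

-- B replaces A's stateful counter-threading loop by a closed-form per-index formula in a
-- single comprehension: an alternative decomposition, same cost.

-- ===== PORT A =====
def generate_angles (count : Int) (angle : Int) : List Int :=
  let angles : List Int := []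
  let start_angle : Int := 0
  let counter : Int := 0
  let st0 : List Int × Int :=
    if PySem.Int.mod count 2 ≠ 0 then (angles ++ [start_angle], 1) else (angles, counter)
  let st := (PySem.List.pyRange 1 count 1).foldl
    (fun (st : List Int × Int) i =>
      if PySem.Int.mod i 2 = 1 then (st.1 ++ [start_angle - st.2 * angle], st.2)
      else (st.1 ++ [start_angle + st.2 * angle], st.2 + 1)) st0
  st.1

-- ===== PORT B =====
def generate_angles_alt (count : Int) (angle : Int) : List Int :=
  let p : Int := if PySem.Int.mod count 2 ≠ 0 then 1 else 0
  let length : Int := p + max (count - 1) 0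
  (PySem.List.pyRange 0 length 1).map (fun j =>
    PySem.Int.floordiv (j + p) 2 * angle * (if PySem.Int.mod j 2 = p then -1 else 1))

-- ===== PRECONDITION & SPEC =====
def Spec_generate_angles (count : Int) (angle : Int) (out : List Int) : Prop := out = generate_angles_alt count angle
instance (count : Int) (angle : Int) (out : List Int) : Decidable (Spec_generate_angles count angle out) := by unfold Spec_generate_angles; infer_instance

-- ===== CLAIM (what is proved, stated in full; the proofs are below) =====
def Claim_equal_generate_angles : Prop := ∀ (count : Int) (angle : Int), Dom_generate_angles count angle → Spec_generate_angles count angle (generate_angles count angle)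

-- ===== LEMMAS AND PROOFS =====

-- the symmetric tail both programs generate: n elements -k*a, k*a, -(k+1)*a, (k+1)*a, …
def gen (a : Int) : Int → Nat → List Int
  | _, 0 => []
  | k, 1 => [-k * a]
  | k, Nat.succ (Nat.succ n) => -k * a :: k * a :: gen a (k + 1) n

-- A's fold over range(i, i+n) starting at (res, c) appends exactly gen a c n
lemma foldA_eq (angle : Int) : ∀ n : Nat, ∀ (i : Int), i % 2 = 1 → ∀ (res : List Int) (c : Int),
    ((PySem.List.pyRange i (i + n) 1).foldl
      (fun (st : List Int × Int) j =>
        if PySem.Int.mod j 2 = 1 then (st.1 ++ [0 - st.2 * angle], st.2)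
        else (st.1 ++ [0 + st.2 * angle], st.2 + 1)) (res, c)).1
    = res ++ gen angle c n := by
  intro n
  induction n using Nat.strong_induction_on with
  | _ n ih =>
    intro i hi res c
    match n with
    | 0 => simp [gen]
    | 1 =>
      rw [PySem.List.pyRange_one_cons (by push_cast; omega)]
      rw [PySem.List.pyRange_one_eq_nil (by push_cast; omega)]
      simp only [List.foldl_cons, List.foldl_nil]
      rw [PySem.Int.mod_eq_emod_of_pos (by norm_num : (0:Int) < 2), if_pos hi]
      simp [gen]
    | Nat.succ (Nat.succ m) =>
      rw [PySem.List.pyRange_one_cons (by push_cast; omega)]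
      rw [PySem.List.pyRange_one_cons (by push_cast; omega)]
      simp only [List.foldl_cons]
      rw [PySem.Int.mod_eq_emod_of_pos (by norm_num : (0:Int) < 2),
          PySem.Int.mod_eq_emod_of_pos (by norm_num : (0:Int) < 2)]
      rw [if_pos hi, if_neg (by omega)]
      have hc : i + ((m.succ.succ : ℕ) : ℤ) = i + 1 + 1 + m := by push_cast; omega
      rw [hc]
      have := ih m (by omega) (i + 1 + 1) (by omega) (res ++ [0 - c * angle] ++ [0 + c * angle]) (c + 1)
      simp only at this ⊢
      rw [this]
      simp [gen]

lemma pyRange_shift (count : Int) :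
    PySem.List.pyRange 1 count 1 = PySem.List.pyRange 1 (1 + ((count - 1).toNat : Int)) 1 := by
  by_cases h : count ≤ 1
  · rw [PySem.List.pyRange_one_eq_nil h, PySem.List.pyRange_one_eq_nil (by omega)]
  · congr 1; omega

-- closed form of gen as a map over indices
lemma gen_eq_map (a : Int) : ∀ (n : Nat) (k : Int),
    gen a k n = (List.range n).map
      (fun t => (if t % 2 = 0 then -(k + (t / 2 : Nat)) else (k + (t / 2 : Nat))) * a) := by
  intro n
  induction n using Nat.strong_induction_on with
  | _ n ih =>
    intro k
    match n with
    | 0 => simp [gen]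
    | 1 => simp [gen, List.range_succ]
    | Nat.succ (Nat.succ m) =>
      simp only [List.range_succ_eq_map, List.map_cons, List.map_map]
      show gen a k (m + 2) = _
      rw [gen, ih m (by omega) (k + 1)]
      simp only [List.cons.injEq]
      refine ⟨by norm_num, by norm_num, ?_⟩
      apply List.map_congr_left
      intro t _
      simp only [Function.comp]
      have h2 : (t + 1 + 1) % 2 = t % 2 := by omega
      have h3 : (t + 1 + 1) / 2 = t / 2 + 1 := by omega
      rw [h2, h3]
      split <;> push_cast <;> ring

-- ===== VERDICT (by name: the statement is the Claim_ definition above) =====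
theorem generate_angles_spec : Claim_equal_generate_angles := by
  intro count angle _
  unfold Spec_generate_angles generate_angles generate_angles_alt
  simp only
  have hmod := PySem.Int.mod_eq_emod_of_pos (by norm_num : (0:Int) < 2) (a := count)
  have hcases : count % 2 = 0 ∨ count % 2 = 1 := by omega
  rw [hmod, pyRange_shift]
  rw [foldA_eq angle (count - 1).toNat 1 (by norm_num) _ _]
  rcases hcases with hpar | hpar
  · -- even count: A = gen a 0 (count-1)⁺, B maps p = 0
    rw [if_neg (by omega), if_neg (by omega)]
    rw [PySem.List.pyRange_one, gen_eq_map]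
    have hL : (0 + max (count - 1) 0 - 0).toNat = (count - 1).toNat := by omega
    rw [hL, List.map_map]
    simp only [List.nil_append]
    apply List.map_congr_left
    intro t _
    simp only [Function.comp, zero_add, add_zero,
      PySem.Int.mod_eq_emod_of_pos (by norm_num : (0:Int) < 2),
      PySem.Int.floordiv_eq_ediv_of_pos (by norm_num : (0:Int) < 2)]
    split_ifs with h1 h2 h2
    · rw [show ((t / 2 : Nat) : Int) = (t : Int) / 2 from by omega]; ring
    · exact absurd (by omega) h2
    · exact absurd (by omega) h1
    · rw [show ((t / 2 : Nat) : Int) = (t : Int) / 2 from by omega]; ring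
  · -- odd count: A = [0] ++ gen a 1 (count-1)⁺, B maps p = 1
    rw [if_pos (by omega), if_pos (by omega)]
    rw [PySem.List.pyRange_one, gen_eq_map]
    have hL : (1 + max (count - 1) 0 - 0).toNat = (count - 1).toNat + 1 := by omega
    rw [hL, List.range_succ_eq_map]
    simp only [List.map_cons, List.map_map, List.nil_append, List.singleton_append,
      List.cons.injEq, zero_add, Nat.cast_zero,
      PySem.Int.mod_eq_emod_of_pos (by norm_num : (0:Int) < 2),
      PySem.Int.floordiv_eq_ediv_of_pos (by norm_num : (0:Int) < 2)]
    constructor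
    · norm_num
    · apply List.map_congr_left
      intro t _
      simp only [Function.comp_apply]
      push_cast
      split_ifs with h1 h2 h2
      · have h : ((t : Int) + 1 + 1) / 2 = (t : Int) / 2 + 1 := by omega
        linear_combination angle * h
      · exact absurd (by omega) h2
      · exact absurd (by omega) h1
      · have h : ((t : Int) + 1 + 1) / 2 = (t : Int) / 2 + 1 := by omega
        linear_combination (-angle) * h
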